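-- pv_equiv track=rewrite | github.com/joaovmoura/LP1-2019.2-TST | TST/Listas/toppl.py | filtra_alunos
-- ===== SOURCE A (Python) =====
-- def filtra_alunos(alunos, inscritos, media):
-- 	indices = []
-- 	k=0
-- 	def novo_in(lista, e):
-- 		for el in lista:
-- 			if el == e:
-- 				return True
-- 		return False
-- 	def remove_elementos(lista, indices):
-- 		for i in range(len(indices)):
-- 			for j in range(indices[i], len(lista)-1):
-- 				lista[j], lista[j+1] = lista[j+1], lista[j]
-- 			lista.pop()
-- 	for i in range(len(alunos)):
-- 		if not novo_in(inscritos, alunos[i][0]):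
-- 			indices.append(i-k)
-- 			k+=1
-- 		elif alunos[i][1]<media:
-- 			indices.append(i-k)
-- 			k+=1
-- 	remove_elementos(alunos, indices)
-- 	return k
-- ===== SOURCE B (Python) =====
-- def filtra_alunos(alunos, inscritos, media):
--     # Single filter pass instead of index bookkeeping + shift-and-pop removal.
--     # Same in-place mutation of alunos (alunos[:] = kept) and same return count.
--     kept = [a for a in alunos if a[0] in inscritos and a[1] >= media]
--     removed = len(alunos) - len(kept)
--     alunos[:] = kept
--     return removed
-- ===== Notes on version B (the rewrite author's own statement) =====
-- stated objective: simpler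
-- what changed: Replaces the two-phase index collection plus O(n^2) shift-and-pop removal with one filter comprehension, returning len(alunos) - len(kept) and assigning kept back in place.
import Mathlib
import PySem

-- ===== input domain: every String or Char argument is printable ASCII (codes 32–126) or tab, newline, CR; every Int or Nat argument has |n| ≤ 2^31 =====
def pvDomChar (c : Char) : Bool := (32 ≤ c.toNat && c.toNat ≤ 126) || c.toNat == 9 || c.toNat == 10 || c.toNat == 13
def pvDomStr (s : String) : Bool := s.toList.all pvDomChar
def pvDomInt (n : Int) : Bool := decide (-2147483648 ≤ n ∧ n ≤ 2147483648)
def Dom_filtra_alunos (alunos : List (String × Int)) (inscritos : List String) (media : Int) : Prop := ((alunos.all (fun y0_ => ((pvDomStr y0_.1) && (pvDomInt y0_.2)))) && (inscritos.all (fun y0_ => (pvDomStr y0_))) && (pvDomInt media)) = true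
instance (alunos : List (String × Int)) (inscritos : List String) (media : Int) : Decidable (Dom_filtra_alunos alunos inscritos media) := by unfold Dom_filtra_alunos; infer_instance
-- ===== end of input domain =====

-- ===== PORT A =====
-- B replaces A's index bookkeeping + shift-and-pop with one filter comprehension (simpler);
-- both mutate alunos in place to the same kept list; the equivalence proved here is about the return value.
-- novo_in: linear membership scan
def pvNovoIn (lista : List String) (e : String) : Bool :=
  match lista with
  | [] => false
  | el :: rest => if el == e then true else pvNovoIn rest e

-- the body of A's main loop over i in range(len(alunos)), state = (indices, k)
def pvStepA (alunos : List (String × Int)) (inscritos : List String) (media : Int)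
    (st : List Int × Int) (i : Int) : List Int × Int :=
  let a := PySem.List.pyGetD alunos i ("", 0)
  if ¬ pvNovoIn inscritos a.1 then (st.1 ++ [i - st.2], st.2 + 1)
  else if a.2 < media then (st.1 ++ [i - st.2], st.2 + 1)
  else st

-- remove_elementos only mutates alunos in place (shift-and-pop); it does not affect the returned k
def filtra_alunos (alunos : List (String × Int)) (inscritos : List String) (media : Int) : Int :=
  ((PySem.List.pyRange 0 (alunos.length : Int) 1).foldl (pvStepA alunos inscritos media) ([], 0)).2

-- ===== PORT B =====
def filtra_alunos_alt (alunos : List (String × Int)) (inscritos : List String) (media : Int) : Int :=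
  let kept := alunos.filter (fun a => inscritos.contains a.1 && decide (media ≤ a.2))
  (alunos.length : Int) - (kept.length : Int)

-- ===== PRECONDITION & SPEC =====
def Spec_filtra_alunos (alunos : List (String × Int)) (inscritos : List String) (media : Int) (out : Int) : Prop := out = filtra_alunos_alt alunos inscritos media
instance (alunos : List (String × Int)) (inscritos : List String) (media : Int) (out : Int) : Decidable (Spec_filtra_alunos alunos inscritos media out) := by unfold Spec_filtra_alunos; infer_instance

-- ===== CLAIM (what is proved, stated in full; the proofs are below) =====
def Claim_equal_filtra_alunos : Prop := ∀ (alunos : List (String × Int)) (inscritos : List String) (media : Int), Dom_filtra_alunos alunos inscritos media → Spec_filtra_alunos alunos inscritos media (filtra_alunos alunos inscritos media)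

-- ===== LEMMAS AND PROOFS =====

-- ===== VERDICT (by name: the statement is the Claim_ definition above) =====
lemma pvNovoIn_eq_contains (lista : List String) (e : String) :
    pvNovoIn lista e = lista.contains e := by
  induction lista with
  | nil => rfl
  | cons x xs ih =>
    have hx : (e == x) = (x == e) := by simp [eq_comm]
    simp only [pvNovoIn, List.contains_cons, hx, ih]
    cases h : x == e <;> simp

lemma pvStepA_snd (alunos : List (String × Int)) (inscritos : List String) (media : Int)
    (st : List Int × Int) (i : Int) :
    (pvStepA alunos inscritos media st i).2 =
      st.2 + (if ¬ pvNovoIn inscritos (PySem.List.pyGetD alunos i ("", 0)).1 ∨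
                 (PySem.List.pyGetD alunos i ("", 0)).2 < media then 1 else 0) := by
  by_cases h1 : pvNovoIn inscritos (PySem.List.pyGetD alunos i ("", 0)).1 <;>
    by_cases h2 : (PySem.List.pyGetD alunos i ("", 0)).2 < media <;>
      simp [pvStepA, h1, h2]

lemma foldlK (inscritos : List String) (media : Int) :
    ∀ (xs : List (String × Int)) (st : List Int × Int),
    ((PySem.List.pyRange 0 (xs.length : Int) 1).foldl (pvStepA xs inscritos media) st).2
      = st.2 + (xs.countP
          (fun a => !(pvNovoIn inscritos a.1) || decide (a.2 < media)) : Int) := by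
  intro xs
  induction xs using List.reverseRecOn with
  | nil => intro st; simp [PySem.List.pyRange_one_eq_nil]
  | append_singleton ys y ih =>
    intro st
    have hlen : ((ys ++ [y]).length : Int) = (ys.length : Int) + 1 := by
      push_cast [List.length_append, List.length_singleton]; ring
    rw [hlen, PySem.List.pyRange_one_succ_right (by positivity), List.foldl_append]
    have hcongr : (PySem.List.pyRange 0 (ys.length : Int) 1).foldl
        (pvStepA (ys ++ [y]) inscritos media) st
        = (PySem.List.pyRange 0 (ys.length : Int) 1).foldl (pvStepA ys inscritos media) st := by
      apply PySem.List.foldl_congr_mem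
      intro acc i hi
      have hmem := (PySem.List.mem_pyRange_one).mp hi
      have h0 : 0 ≤ i := hmem.1
      have h1 : i < (ys.length : Int) := hmem.2
      unfold pvStepA
      rw [PySem.List.pyGetD_eq_getElem _ _ h0
            (by rw [List.length_append]; omega),
          PySem.List.pyGetD_eq_getElem _ _ h0 (by exact_mod_cast h1),
          List.getElem_append_left (by omega)]
    rw [List.foldl_cons, List.foldl_nil, hcongr]
    have hlast : PySem.List.pyGetD (ys ++ [y]) (ys.length : Int) ("", 0) = y := by
      rw [PySem.List.pyGetD_natCast]
      simp
    rw [pvStepA_snd, ih st, hlast, List.countP_append, List.countP_singleton]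
    by_cases h1 : pvNovoIn inscritos y.1 <;> by_cases h2 : y.2 < media <;>
      simp [h1, h2] <;> omega

lemma countP_not_add (xs : List (String × Int)) (p : (String × Int) → Bool) :
    xs.countP (fun a => !(p a)) + xs.countP p = xs.length := by
  induction xs with
  | nil => rfl
  | cons x t ih =>
    simp only [List.countP_cons, List.length_cons, ← ih]
    by_cases h : p x <;> simp [h] <;> ring

theorem filtra_alunos_spec : Claim_equal_filtra_alunos := by
  intro alunos inscritos media _
  simp only [Spec_filtra_alunos, filtra_alunos, filtra_alunos_alt]
  rw [foldlK]
  have hpt : (fun a : String × Int => !(pvNovoIn inscritos a.1) || decide (a.2 < media))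
        = (fun a : String × Int => !(inscritos.contains a.1 && decide (media ≤ a.2))) := by
    funext a
    rw [pvNovoIn_eq_contains]
    by_cases h1 : inscritos.contains a.1 <;> by_cases h2 : a.2 < media
    · simp [h2, not_le.mpr h2]
    · simp [h2, not_lt.mp h2]
    · simp [h2]
    · simp [h2]
  have hadd := countP_not_add alunos (fun a => inscritos.contains a.1 && decide (media ≤ a.2))
  rw [hpt]
  have hc : List.countP (fun a => inscritos.contains a.1 && decide (media ≤ a.2)) alunos
      = (List.filter (fun a => inscritos.contains a.1 && decide (media ≤ a.2)) alunos).length :=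
    List.countP_eq_length_filter
  omega
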